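-- pv_equiv track=rewrite | github.com/mouredev/retos-programacion-2023 | Retos/Reto #14 - OCTAL Y HEXADECIMAL [Fácil]/python/iago1905.py | conversorBase
-- ===== SOURCE A (Python) =====
-- dicccionario = {10: 'A', 11: 'B', 12: 'C', 13: 'D', 14: 'E', 15:'F'}
--
-- def conversorBase(n):
--     octal = ''
--     hexadecimal = ''
--     i = n
--     j = n
--     while i > 0:
--         octal = str(i % 8) + octal
--         i = i // 8
--     while j > 0:
--         if (j % 16) > 9 and (j % 16) < 16:
--             hexadecimal = dicccionario[j % 16] + hexadecimal
--         else:
--             hexadecimal = str(j % 16) + hexadecimal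
--         j = j // 16
--     return octal, hexadecimal
-- ===== SOURCE B (Python) =====
-- DIGITS = '0123456789ABCDEF'
--
-- def to_base(num, base):
--     if num <= 0:
--         return ''
--     return to_base(num // base, base) + DIGITS[num % base]
--
-- def conversorBase(n):
--     return to_base(n, 8), to_base(n, 16)
-- ===== Notes on version B (the rewrite author's own statement) =====
-- stated objective: simpler
-- what changed: Replaces A's two bespoke accumulator while-loops and the 10..15->'A'..'F' dictionary by one generic recursive helper to_base(num, base) that builds the digits front-to-back from a single indexed digit alphabet.
import Mathlib
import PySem

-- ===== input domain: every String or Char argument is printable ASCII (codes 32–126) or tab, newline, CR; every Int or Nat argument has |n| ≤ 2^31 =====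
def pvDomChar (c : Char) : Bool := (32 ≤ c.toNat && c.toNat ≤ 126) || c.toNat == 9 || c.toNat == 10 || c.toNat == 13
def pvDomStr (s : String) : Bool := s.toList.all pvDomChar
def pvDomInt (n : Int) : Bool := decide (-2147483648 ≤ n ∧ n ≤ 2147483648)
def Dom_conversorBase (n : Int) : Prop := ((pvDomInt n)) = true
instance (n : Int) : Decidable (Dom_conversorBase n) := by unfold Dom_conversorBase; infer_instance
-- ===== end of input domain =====

-- B replaces A's two bespoke prepend-loops and the A–F dictionary by one generic
-- recursive base converter over an indexed digit alphabet (objective: simpler).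

-- ===== PORT A =====
-- dicccionario = {10: 'A', ..., 15: 'F'}
def pvDicc : PySem.Dict Int String :=
  PySem.Dict.ofList [(10, "A"), (11, "B"), (12, "C"), (13, "D"), (14, "E"), (15, "F")]

-- while i > 0: octal = str(i % 8) + octal; i = i // 8
def pvOctLoop (i : Int) (octal : String) : String :=
  if h : i > 0 then
    pvOctLoop (PySem.Int.floordiv i 8) (PySem.Int.toStr (PySem.Int.mod i 8) ++ octal)
  else octal
termination_by i.toNat
decreasing_by
  have h1 : PySem.Int.floordiv i 8 < i :=
    (PySem.Int.floordiv_lt_iff_lt_mul (by omega)).mpr (by nlinarith)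
  have h2 : (0:Int) ≤ PySem.Int.floordiv i 8 :=
    (PySem.Int.le_floordiv_iff_mul_le (by omega)).mpr (by omega)
  omega

-- while j > 0: hex digit via the dict for 10..15, str(j % 16) otherwise; j = j // 16
-- (dicccionario[j % 16]: the branch guarantees the key is present, so the KeyError
--  case is unreachable; get? … .getD "" is exact there)
def pvHexDigitA (r : Int) : String :=
  if r > 9 ∧ r < 16 then (pvDicc.get? r).getD "" else PySem.Int.toStr r

def pvHexLoop (j : Int) (hexadecimal : String) : String :=
  if h : j > 0 then
    pvHexLoop (PySem.Int.floordiv j 16) (pvHexDigitA (PySem.Int.mod j 16) ++ hexadecimal)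
  else hexadecimal
termination_by j.toNat
decreasing_by
  have h1 : PySem.Int.floordiv j 16 < j :=
    (PySem.Int.floordiv_lt_iff_lt_mul (by omega)).mpr (by nlinarith)
  have h2 : (0:Int) ≤ PySem.Int.floordiv j 16 :=
    (PySem.Int.le_floordiv_iff_mul_le (by omega)).mpr (by omega)
  omega

def conversorBase (n : Int) : String × String :=
  (pvOctLoop n "", pvHexLoop n "")

-- ===== PORT B =====
def pvDIGITS : String := "0123456789ABCDEF"

-- def to_base(num, base): '' if num <= 0 else to_base(num // base, base) + DIGITS[num % base]
-- (base is always 8 or 16 here; hb only justifies termination.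
--  DIGITS[num % base]: 0 ≤ num % base < base ≤ 16, so indexing never raises; .getD "" is exact)
-- DIGITS[r]: a 1-character string (indexing never raises: 0 ≤ r < base ≤ 16)
def pvDigitStr (r : Int) : String :=
  match PySem.Str.pyGet? pvDIGITS r with
  | some c => String.ofList [c]
  | none => ""

def pvToBase (num base : Int) (hb : 2 ≤ base) : String :=
  if h : num ≤ 0 then ""
  else
    pvToBase (PySem.Int.floordiv num base) base hb ++ pvDigitStr (PySem.Int.mod num base)
termination_by num.toNat
decreasing_by
  have h1 : PySem.Int.floordiv num base < num :=
    (PySem.Int.floordiv_lt_iff_lt_mul (by omega)).mpr (by nlinarith)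
  have h2 : (0:Int) ≤ PySem.Int.floordiv num base :=
    (PySem.Int.le_floordiv_iff_mul_le (by omega)).mpr (by nlinarith)
  omega

def conversorBase_alt (n : Int) : String × String :=
  (pvToBase n 8 (by decide), pvToBase n 16 (by decide))

-- ===== PRECONDITION & SPEC =====
def Spec_conversorBase (n : Int) (out : String × String) : Prop := out = conversorBase_alt n
instance (n : Int) (out : String × String) : Decidable (Spec_conversorBase n out) := by unfold Spec_conversorBase; infer_instance

-- ===== CLAIM (what is proved, stated in full; the proofs are below) =====
def Claim_equal_conversorBase : Prop := ∀ (n : Int), Dom_conversorBase n → Spec_conversorBase n (conversorBase n)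

-- ===== LEMMAS AND PROOFS =====

-- A's octal digit string equals B's alphabet lookup, for the residues mod 8
theorem pvOctDigit_eq (r : Int) (h0 : 0 ≤ r) (h8 : r < 8) :
    PySem.Int.toStr r = pvDigitStr r := by
  interval_cases r <;> decide

-- A's hex digit (dict for 10..15, str otherwise) equals B's alphabet lookup, mod 16
theorem pvHexDigit_eq (r : Int) (h0 : 0 ≤ r) (h16 : r < 16) :
    pvHexDigitA r = pvDigitStr r := by
  interval_cases r <;> decide

theorem pvOctLoop_eq (i : Int) (acc : String) :
    pvOctLoop i acc = pvToBase i 8 (by decide) ++ acc := by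
  fun_induction pvOctLoop i acc with
  | case1 i acc h ih =>
    have hm0 := PySem.Int.mod_nonneg (a := i) (b := 8) (by omega)
    have hm8 := PySem.Int.mod_lt (a := i) (b := 8) (by omega)
    rw [ih, pvOctDigit_eq _ hm0 hm8]
    conv_rhs => rw [pvToBase]
    rw [dif_neg (by omega : ¬ i ≤ 0), String.append_assoc]
  | case2 i acc h =>
    rw [pvToBase, dif_pos (by omega : i ≤ 0)]
    simp

theorem pvHexLoop_eq (j : Int) (acc : String) :
    pvHexLoop j acc = pvToBase j 16 (by decide) ++ acc := by
  fun_induction pvHexLoop j acc with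
  | case1 j acc h ih =>
    have hm0 := PySem.Int.mod_nonneg (a := j) (b := 16) (by omega)
    have hm16 := PySem.Int.mod_lt (a := j) (b := 16) (by omega)
    rw [ih, pvHexDigit_eq _ hm0 hm16]
    conv_rhs => rw [pvToBase]
    rw [dif_neg (by omega : ¬ j ≤ 0), String.append_assoc]
  | case2 j acc h =>
    rw [pvToBase, dif_pos (by omega : j ≤ 0)]
    simp

-- ===== VERDICT (by name: the statement is the Claim_ definition above) =====
theorem conversorBase_spec : Claim_equal_conversorBase := by
  intro n _
  unfold Spec_conversorBase conversorBase conversorBase_alt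
  rw [pvOctLoop_eq, pvHexLoop_eq]
  simp
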